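-- pv_equiv track=rewrite | github.com/anzalarizqi/pejabatkita | supabase/seed/build_wilayah_snapshot.py | _normalize_emsifa_name
-- ===== SOURCE A (Python) =====
-- def _normalize_emsifa_name(raw: str) -> str:
--     """
--     emsifa names are ALL CAPS and sometimes spaced ('KOTA B A T A M', 'KOTA BANDAR LAMPUNG').
--     Convert to Title Case and collapse single-letter spacing.
--     """
--     parts = raw.split()
--     # Collapse runs of single letters: ['B','A','T','A','M'] -> ['BATAM']
--     collapsed: list[str] = []
--     buf: list[str] = []
--     for part in parts:
--         if len(part) == 1:
--             buf.append(part)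
--         else:
--             if buf:
--                 collapsed.append("".join(buf))
--                 buf = []
--             collapsed.append(part)
--     if buf:
--         collapsed.append("".join(buf))
--     return " ".join(w.capitalize() for w in collapsed)
-- ===== SOURCE B (Python) =====
-- def _normalize_emsifa_name(raw: str) -> str:
--     # Two-pointer run scan: find each maximal run of single-letter tokens,
--     # emit it as one joined word; other tokens pass through one by one.
--     parts = raw.split()
--     n = len(parts)
--     words = []
--     i = 0
--     while i < n:
--         if len(parts[i]) == 1:
--             j = i
--             while j < n and len(parts[j]) == 1:
--                 j += 1
--             words.append("".join(parts[i:j]))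
--             i = j
--         else:
--             words.append(parts[i])
--             i += 1
--     return " ".join(w.capitalize() for w in words)
-- ===== Notes on version B (the rewrite author's own statement) =====
-- stated objective: alternative
-- what changed: Replaces A's buffer-accumulate-and-flush state machine with a two-pointer scan that locates each maximal run of single-letter tokens by index and emits it as one joined word.
import Mathlib
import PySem

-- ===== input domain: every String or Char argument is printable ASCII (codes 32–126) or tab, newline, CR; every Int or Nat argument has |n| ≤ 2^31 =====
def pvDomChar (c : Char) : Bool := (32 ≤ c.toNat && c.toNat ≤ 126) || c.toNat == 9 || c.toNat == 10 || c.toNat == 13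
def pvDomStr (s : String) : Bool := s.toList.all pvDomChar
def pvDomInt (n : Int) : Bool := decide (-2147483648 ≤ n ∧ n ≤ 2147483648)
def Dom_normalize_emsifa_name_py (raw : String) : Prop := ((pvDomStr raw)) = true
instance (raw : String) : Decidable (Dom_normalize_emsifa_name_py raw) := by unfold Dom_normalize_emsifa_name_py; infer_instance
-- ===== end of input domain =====

-- B replaces A's buffer-accumulate-and-flush state machine with a two-pointer scan over
-- maximal runs of single-letter tokens (alternative decomposition, same complexity).


-- ===== PORT A =====
-- str.capitalize() — exact on the ASCII domain: first char uppercased, the rest lowercased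
def pyCapitalize (w : String) : String :=
  match w.toList with
  | [] => ""
  | c :: cs => String.ofList (PySem.Chars.upperChar c :: PySem.Chars.lower cs)

-- 'len(part) == 1'
def pvSingle (w : String) : Bool := PySem.Str.len w == 1

def normalize_emsifa_name_py (raw : String) : String :=
  let parts := PySem.Str.split₀ raw
  let st := parts.foldl
    (fun (st : List String × List String) part =>
      if pvSingle part then (st.1, st.2 ++ [part])
      else ((if st.2.isEmpty then st.1 else st.1 ++ [PySem.Str.join "" st.2]) ++ [part], []))
    ([], [])
  let collapsed := if st.2.isEmpty then st.1 else st.1 ++ [PySem.Str.join "" st.2]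
  PySem.Str.join " " (collapsed.map pyCapitalize)

-- ===== PORT B =====
-- inner while: 'while j < n and len(parts[j]) == 1: j += 1'
def pvRunEnd (parts : List String) (n j : Nat) : Nat :=
  if h : j < n ∧ pvSingle (PySem.List.pyGetD parts (j : Int) "") then pvRunEnd parts n (j + 1) else j
termination_by n - j
decreasing_by exact Nat.sub_succ_lt_self n j h.1

theorem pvRunEnd_ge (parts : List String) (n j : Nat) : j ≤ pvRunEnd parts n j := by
  fun_induction pvRunEnd parts n j with
  | case1 j h ih => omega
  | case2 j h => omega

theorem pvRunEnd_progress (parts : List String) (n i : Nat) (h : i < n)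
    (hs : pvSingle (PySem.List.pyGetD parts (i : Int) "") = true) :
    n - pvRunEnd parts n i < n - i := by
  rw [pvRunEnd]
  rw [dif_pos ⟨h, hs⟩]
  have := pvRunEnd_ge parts n (i + 1)
  omega

-- outer while over the index i, appending to words
def pvScan (parts : List String) (n i : Nat) (words : List String) : List String :=
  if h : i < n then
    if hs : pvSingle (PySem.List.pyGetD parts (i : Int) "") then
      pvScan parts n (pvRunEnd parts n i)
        (words ++ [PySem.Str.join "" (PySem.List.slice parts (some (i : Int)) (some ((pvRunEnd parts n i : Nat) : Int)))])
    else
      pvScan parts n (i + 1) (words ++ [PySem.List.pyGetD parts (i : Int) ""])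
  else words
termination_by n - i
decreasing_by
  · exact pvRunEnd_progress parts n i h hs
  · exact Nat.sub_succ_lt_self n i h

def normalize_emsifa_name_py_alt (raw : String) : String :=
  let parts := PySem.Str.split₀ raw
  PySem.Str.join " " ((pvScan parts parts.length 0 []).map pyCapitalize)

-- ===== PRECONDITION & SPEC =====
def Spec_normalize_emsifa_name_py (raw : String) (out : String) : Prop := out = normalize_emsifa_name_py_alt raw
instance (raw : String) (out : String) : Decidable (Spec_normalize_emsifa_name_py raw out) := by unfold Spec_normalize_emsifa_name_py; infer_instance

-- ===== CLAIM (what is proved, stated in full; the proofs are below) =====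
def Claim_equal_normalize_emsifa_name_py : Prop := ∀ (raw : String), Dom_normalize_emsifa_name_py raw → Spec_normalize_emsifa_name_py raw (normalize_emsifa_name_py raw)

-- ===== LEMMAS AND PROOFS =====

-- the common specification: the list of collapsed words
def pvWords : List String → List String
  | [] => []
  | p :: rest =>
    if pvSingle p then
      PySem.Str.join "" (p :: rest.takeWhile pvSingle) :: pvWords (rest.dropWhile pvSingle)
    else p :: pvWords rest
termination_by l => l.length
decreasing_by
  · have := List.length_dropWhile_le pvSingle rest; simp; omega
  · simp

theorem pvWords_A (parts : List String) : ∀ (coll buf : List String),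
    (let st := parts.foldl
      (fun (st : List String × List String) part =>
        if pvSingle part then (st.1, st.2 ++ [part])
        else ((if st.2.isEmpty then st.1 else st.1 ++ [PySem.Str.join "" st.2]) ++ [part], []))
      (coll, buf)
     if st.2.isEmpty then st.1 else st.1 ++ [PySem.Str.join "" st.2])
    = coll ++ (if buf.isEmpty then pvWords parts
               else PySem.Str.join "" (buf ++ parts.takeWhile pvSingle) :: pvWords (parts.dropWhile pvSingle)) := by
  induction parts with
  | nil =>
    intro coll buf
    by_cases hb : buf.isEmpty <;> simp [hb, pvWords]
  | cons p rest ih =>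
    intro coll buf
    by_cases hp : pvSingle p
    · simp only [List.foldl_cons, hp, if_true, List.takeWhile_cons, List.dropWhile_cons]
      rw [ih coll (buf ++ [p])]
      by_cases hb : buf.isEmpty
      · have : buf = [] := by simpa using hb
        subst this
        simp [pvWords, hp]
      · simp [hb]
    · simp only [List.foldl_cons, hp, if_false, List.takeWhile_cons, List.dropWhile_cons,
        Bool.false_eq_true]
      rw [ih _ []]
      by_cases hb : buf.isEmpty
      · have : buf = [] := by simpa using hb
        subst this
        simp [pvWords, hp]
      · simp [hb, pvWords, hp]

-- the maximal single-letter run is a take, and what follows it a drop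
theorem pv_takeWhile_take (l : List String) :
    l.takeWhile pvSingle = l.take (l.takeWhile pvSingle).length := by
  induction l with
  | nil => simp
  | cons a t ih => by_cases h : pvSingle a <;> simp [h] <;> exact ih

theorem pv_dropWhile_drop (l : List String) :
    l.dropWhile pvSingle = l.drop (l.takeWhile pvSingle).length := by
  induction l with
  | nil => simp
  | cons a t ih => by_cases h : pvSingle a <;> simp [h] <;> exact ih

theorem pvRunEnd_eq (parts : List String) (i : Nat) :
    pvRunEnd parts parts.length i = i + ((parts.drop i).takeWhile pvSingle).length := by
  fun_induction pvRunEnd parts parts.length i with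
  | case1 j h ih =>
    obtain ⟨hj, hs⟩ := h
    have hdrop : parts.drop j = parts[j] :: parts.drop (j + 1) := List.drop_eq_getElem_cons hj
    have hget : PySem.List.pyGetD parts (j : Int) "" = parts[j] := by
      simp [List.getD_eq_getElem?_getD, hj]
    rw [hget] at hs
    rw [hdrop, List.takeWhile_cons, if_pos hs, ih]
    simp; omega
  | case2 j h =>
    by_cases hj : j < parts.length
    · have hdrop : parts.drop j = parts[j] :: parts.drop (j + 1) := List.drop_eq_getElem_cons hj
      have hget : PySem.List.pyGetD parts (j : Int) "" = parts[j] := by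
        simp [List.getD_eq_getElem?_getD, hj]
      have hs : ¬ pvSingle parts[j] := by
        intro hs; exact h ⟨hj, by rw [hget]; exact hs⟩
      rw [hdrop, List.takeWhile_cons, if_neg hs]
      simp
    · have : parts.drop j = [] := List.drop_eq_nil_of_le (by omega)
      simp [this]

theorem pvScan_eq (parts : List String) (i : Nat) (words : List String) :
    pvScan parts parts.length i words = words ++ pvWords (parts.drop i) := by
  fun_induction pvScan parts parts.length i words with
  | case1 i words hi hs ih =>
    have hdrop : parts.drop i = parts[i] :: parts.drop (i + 1) := List.drop_eq_getElem_cons hi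
    have hget : PySem.List.pyGetD parts (i : Int) "" = parts[i] := by
      simp [List.getD_eq_getElem?_getD, hi]
    rw [hget] at hs
    set t := (parts.drop i).takeWhile pvSingle with ht
    have hre : pvRunEnd parts parts.length i = i + t.length := pvRunEnd_eq parts i
    have hslice : PySem.List.slice parts (some (i : Int))
        (some ((pvRunEnd parts parts.length i : Nat) : Int)) = t := by
      rw [hre]
      have hcast : ((i + t.length : Nat) : Int) = ((i : Nat) : Int) + ((t.length : Nat) : Int) := by
        push_cast; ring
      rw [hcast, PySem.List.slice_natCast_add, ht, ← pv_takeWhile_take]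
    have hdropj : parts.drop (pvRunEnd parts parts.length i)
        = (parts.drop i).dropWhile pvSingle := by
      rw [hre, pv_dropWhile_drop, List.drop_drop, Nat.add_comm]
    have ht2 : t = parts[i] :: (parts.drop (i + 1)).takeWhile pvSingle := by
      rw [ht, hdrop, List.takeWhile_cons, if_pos hs]
    have hd2 : (parts.drop i).dropWhile pvSingle = (parts.drop (i + 1)).dropWhile pvSingle := by
      rw [hdrop, List.dropWhile_cons]; simp [hs]
    rw [ih, hslice, hdropj, hd2, hdrop]
    simp only [pvWords, hs, if_pos, ← ht2]
    simp [List.append_assoc]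
  | case2 i words hi hs ih =>
    have hdrop : parts.drop i = parts[i] :: parts.drop (i + 1) := List.drop_eq_getElem_cons hi
    have hget : PySem.List.pyGetD parts (i : Int) "" = parts[i] := by
      simp [List.getD_eq_getElem?_getD, hi]
    rw [hget] at hs
    rw [ih, hget]
    have hw : pvWords (parts.drop i) = parts[i] :: pvWords (parts.drop (i + 1)) := by
      rw [hdrop, pvWords, if_neg hs]
    rw [hw]
    simp
  | case3 i words hi =>
    have : parts.drop i = [] := List.drop_eq_nil_of_le (by omega)
    simp [this, pvWords]


-- ===== VERDICT (by name: the statement is the Claim_ definition above) =====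
theorem normalize_emsifa_name_py_spec : Claim_equal_normalize_emsifa_name_py := by
  intro raw _
  unfold Spec_normalize_emsifa_name_py normalize_emsifa_name_py normalize_emsifa_name_py_alt
  simp only [pvWords_A, List.isEmpty_nil, if_true, List.nil_append]
  rw [pvScan_eq _ 0]
  simp
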